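-- pv_equiv track=rewrite | github.com/amots12/gt-bar-race | scripts/scrape_gc_daily_top10.py | gap_to_seconds
-- ===== SOURCE A (Python) =====
-- def gap_to_seconds(gap: str) -> int:
--     if not gap or "same" in gap.lower():
--         return 0
--
--     gap = gap.replace("+", "").strip()
--     parts = gap.split(":")
--
--     try:
--         parts = [int(p) for p in parts]
--     except ValueError:
--         return 0
--
--     if len(parts) == 2:   # mm:ss
--         return parts[0] * 60 + parts[1]
--
--     if len(parts) == 3:   # hh:mm:ss
--         return parts[0] * 3600 + parts[1] * 60 + parts[2]
--
--     return 0
-- ===== SOURCE B (Python) =====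
-- def gap_to_seconds(gap: str) -> int:
--     if not gap or "same" in gap.lower():
--         return 0
--     s = gap.replace("+", "").strip()
--     total = 0
--     n = 0
--     while True:
--         i = s.find(":")
--         if i < 0:
--             try:
--                 v = int(s)
--             except ValueError:
--                 return 0
--             return total * 60 + v if n + 1 in (2, 3) else 0
--         try:
--             v = int(s[:i])
--         except ValueError:
--             return 0
--         total, n, s = total * 60 + v, n + 1, s[i + 1:]
-- ===== Notes on version B (the rewrite author's own statement) =====
-- stated objective: alternative
-- what changed: Instead of splitting into a parts list, converting it with a list comprehension and applying one of two closed formulas keyed on its length, B streams through the string once with str.find and slicing, converting and accumulating each colon-separated piece in base 60 as it is peeled off and counting pieces on the fly, never materialising a parts list.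
import Mathlib
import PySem

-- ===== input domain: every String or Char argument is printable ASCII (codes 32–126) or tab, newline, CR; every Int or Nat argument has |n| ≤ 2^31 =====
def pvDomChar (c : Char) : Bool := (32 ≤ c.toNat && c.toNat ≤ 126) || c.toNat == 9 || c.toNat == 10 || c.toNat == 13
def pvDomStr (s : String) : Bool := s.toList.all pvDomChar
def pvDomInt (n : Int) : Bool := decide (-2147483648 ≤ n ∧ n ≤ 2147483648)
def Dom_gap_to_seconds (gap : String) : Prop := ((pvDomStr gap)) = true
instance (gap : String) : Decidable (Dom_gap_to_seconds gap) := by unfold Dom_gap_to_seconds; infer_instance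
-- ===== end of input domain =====

-- B replaces A's split/list-comprehension/closed-formula pipeline with a single streaming scan:
-- it peels one colon-separated piece at a time with find(':')/slicing, converting and accumulating
-- as it goes, never building the list of parts (objective: alternative).
-- ===== PORT A =====
def gap_to_seconds (gap : String) : Int :=
  if gap == "" || PySem.Str.isIn "same" (PySem.Str.lower gap) then 0
  else
    let g := PySem.Str.strip (PySem.Str.replace gap "+" "")
    let parts := (PySem.Str.split? g ":").getD []   -- ':' is non-empty, so split? is always `some`
    match parts.mapM PySem.Int.ofStr? with          -- [int(p) for p in parts]; none = ValueError
    | none => 0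
    | some ps =>
      if ps.length = 2 then ps.getD 0 0 * 60 + ps.getD 1 0
      else if ps.length = 3 then ps.getD 0 0 * 3600 + ps.getD 1 0 * 60 + ps.getD 2 0
      else 0

-- ===== PORT B =====
-- the `while True` loop of Source B, as a recursion on the remaining string (it shrinks past each ':')
def gapScan (s : List Char) (total : Int) (n : Nat) : Int :=
  let i := PySem.Chars.find s [':']
  if hi : i < 0 then
    match PySem.Int.ofChars? s with                 -- v = int(s); ValueError -> 0
    | none => 0
    | some v => if n + 1 = 2 ∨ n + 1 = 3 then total * 60 + v else 0
  else
    match PySem.Int.ofChars? (PySem.List.slice s none (some i)) with   -- v = int(s[:i])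
    | none => 0
    | some v => gapScan (PySem.List.slice s (some (i + 1)) none) (total * 60 + v) (n + 1)
termination_by s.length
decreasing_by
  have h0 : (0:Int) ≤ PySem.Chars.find s [':'] := not_lt.1 hi
  have hmem : (':':Char) ∈ s :=
    (List.singleton_infix_iff ':' s).1 ((PySem.Chars.find_nonneg_iff s [':']).1 h0)
  have hne : s ≠ [] := by rintro rfl; simp at hmem
  rw [PySem.List.slice_from s (by omega)]
  simp only [List.length_drop]
  have : 0 < s.length := List.length_pos_iff.2 hne
  omega

def gap_to_seconds_alt (gap : String) : Int :=
  if gap == "" || PySem.Str.isIn "same" (PySem.Str.lower gap) then 0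
  else gapScan (PySem.Str.strip (PySem.Str.replace gap "+" "")).toList 0 0

-- ===== PRECONDITION & SPEC =====
def Spec_gap_to_seconds (gap : String) (out : Int) : Prop := out = gap_to_seconds_alt gap
instance (gap : String) (out : Int) : Decidable (Spec_gap_to_seconds gap out) := by unfold Spec_gap_to_seconds; infer_instance

-- ===== CLAIM (what is proved, stated in full; the proofs are below) =====
def Claim_equal_gap_to_seconds : Prop := ∀ (gap : String), Dom_gap_to_seconds gap → Spec_gap_to_seconds gap (gap_to_seconds gap)

-- ===== LEMMAS AND PROOFS =====
-- Structural characterisation of Python's s.split(":"): `colSplit [] s` is the list of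
-- colon-separated pieces of s (cur = piece read so far, reversed).
def colSplit (cur : List Char) : List Char → List (List Char)
  | [] => [cur.reverse]
  | c :: rest => if c = ':' then cur.reverse :: colSplit [] rest else colSplit (c :: cur) rest

lemma splitOn_go_eq_colSplit (fuel : Nat) (l cur : List Char) (acc : List (List Char))
    (hf : l.length < fuel) :
    PySem.Chars.splitOn.go [':'] fuel l cur acc = acc.reverse ++ colSplit cur l := by
  induction fuel generalizing l cur acc with
  | zero => omega
  | succ m ih =>
    cases l with
    | nil => simp [PySem.Chars.splitOn.go, colSplit]
    | cons c rest =>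
      simp only [PySem.Chars.splitOn.go]
      by_cases hc : c = ':'
      · subst hc
        have hp : [':'].isPrefixOf (':' :: rest) = true := by simp [List.isPrefixOf]
        rw [if_pos hp]
        simp only [List.length, List.drop_succ_cons, List.drop_zero] at *
        rw [ih rest [] (cur.reverse :: acc) (by simpa using Nat.lt_of_succ_lt_succ hf)]
        simp [colSplit]
      · have hp : [':'].isPrefixOf (c :: rest) = false := by
          simp [List.isPrefixOf]; exact fun h => hc h.symm
        rw [if_neg (by simp [hp])]
        rw [ih rest (c :: cur) acc (by simpa using Nat.lt_of_succ_lt_succ hf)]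
        simp [colSplit, hc]

lemma splitOn_eq_colSplit (s : List Char) : PySem.Chars.splitOn s [':'] = colSplit [] s := by
  unfold PySem.Chars.splitOn
  simpa using splitOn_go_eq_colSplit (s.length + 1) s [] [] (by omega)

lemma colSplit_no_colon (cur s : List Char) (h : (':':Char) ∉ s) :
    colSplit cur s = [cur.reverse ++ s] := by
  induction s generalizing cur with
  | nil => simp [colSplit]
  | cons c rest ih =>
    have hc : c ≠ ':' := by intro hc; exact h (hc ▸ List.mem_cons_self ..)
    simp only [colSplit, if_neg hc]
    rw [ih (c :: cur) (fun hm => h (List.mem_cons_of_mem _ hm))]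
    simp

lemma colSplit_append (cur xs ys : List Char) (h : (':':Char) ∉ xs) :
    colSplit cur (xs ++ ':' :: ys) = (cur.reverse ++ xs) :: colSplit [] ys := by
  induction xs generalizing cur with
  | nil => simp [colSplit]
  | cons c rest ih =>
    have hc : c ≠ ':' := by intro hc; exact h (hc ▸ List.mem_cons_self ..)
    simp only [List.cons_append, colSplit, if_neg hc]
    rw [ih (c :: cur) (fun hm => h (List.mem_cons_of_mem _ hm))]
    simp

-- What Python's s.find(":") yields: either no colon at all, or a decomposition of s at the
-- FIRST colon.
lemma find_decomp (s : List Char) (h : ¬ PySem.Chars.find s [':'] < 0) :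
    (':':Char) ∉ s.take (PySem.Chars.find s [':']).toNat ∧
    (PySem.Chars.find s [':']).toNat < s.length ∧
    s = s.take (PySem.Chars.find s [':']).toNat ++
        ':' :: s.drop ((PySem.Chars.find s [':']).toNat + 1) := by
  have h0 : (0:Int) ≤ PySem.Chars.find s [':'] := not_lt.1 h
  have hne : PySem.Chars.findFrom s [':'] ((0:Nat):Int) ≠ -1 := by
    simpa [PySem.Chars.findFrom_zero] using (by omega : PySem.Chars.find s [':'] ≠ -1)
  obtain ⟨-, hpre, hmin⟩ := PySem.Chars.findFrom_natCast_spec s [':'] 0 (Nat.zero_le _) hne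
  rw [show ((0:Nat):Int) = (0:Int) by norm_num, PySem.Chars.findFrom_zero] at hpre hmin
  set i := (PySem.Chars.find s [':']).toNat with hi
  obtain ⟨t, ht⟩ := hpre
  have hilen : i < s.length := by
    by_contra hge
    rw [List.drop_eq_nil_of_le (le_of_not_gt hge)] at ht
    simp at ht
  have hd : s.drop i = ':' :: t := by rw [← ht]; rfl
  have hc : s[i] = ':' := by
    have h1 : (s.drop i).head? = some ':' := by rw [hd]; rfl
    rw [List.head?_drop, List.getElem?_eq_getElem hilen] at h1
    exact Option.some.inj h1
  refine ⟨?_, hilen, ?_⟩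
  · intro hmem
    obtain ⟨j, hj, hjc⟩ := List.mem_iff_getElem.1 hmem
    rw [List.length_take] at hj
    have hj' : j < i := lt_of_lt_of_le hj (min_le_left _ _)
    apply hmin j (Nat.zero_le _) hj'
    have hjlen : j < s.length := lt_trans hj' hilen
    refine ⟨s.drop (j+1), ?_⟩
    rw [List.getElem_take] at hjc
    rw [← hjc, List.singleton_append]
    exact List.getElem_cons_drop hjlen
  · conv_lhs => rw [← List.take_append_drop i s]
    congr 1
    rw [← hc]
    exact (List.getElem_cons_drop hilen).symm

-- Horner step: folding the streaming accumulator over the pieces.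
lemma gapScan_eq (s : List Char) (total : Int) (n : Nat) :
    gapScan s total n =
      match (colSplit [] s).mapM PySem.Int.ofChars? with
      | none => 0
      | some ps =>
          if n + ps.length = 2 ∨ n + ps.length = 3 then
            ps.foldl (fun t p => t * 60 + p) total
          else 0 := by
  induction hk : s.length using Nat.strong_induction_on generalizing s total n with
  | _ k ih =>
  subst hk
  rw [gapScan]
  by_cases hi : PySem.Chars.find s [':'] < 0
  · -- no colon: s is the single piece
    have hnm : (':':Char) ∉ s := by
      intro hm
      have : (0:Int) ≤ PySem.Chars.find s [':'] :=
        (PySem.Chars.find_nonneg_iff s [':']).2 ((List.singleton_infix_iff ':' s).2 hm)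
      omega
    rw [colSplit_no_colon [] s hnm]
    simp only [dif_pos hi, List.reverse_nil, List.nil_append]
    cases hv : PySem.Int.ofChars? s with
    | none => simp [List.mapM_cons, hv]
    | some v => simp [List.mapM_cons, hv, List.foldl]
  · -- a colon at index i: peel the first piece and recurse
    obtain ⟨hno, hilen, hdec⟩ := find_decomp s hi
    have h0 : (0:Int) ≤ PySem.Chars.find s [':'] := not_lt.1 hi
    set i := (PySem.Chars.find s [':']).toNat with hidef
    have hslice_to : PySem.List.slice s none (some (PySem.Chars.find s [':'])) = s.take i := by
      rw [PySem.List.slice_to s h0]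
    have hslice_from :
        PySem.List.slice s (some (PySem.Chars.find s [':'] + 1)) none = s.drop (i + 1) := by
      rw [PySem.List.slice_from s (by omega)]
      congr 1
      omega
    have hlt : (s.drop (i + 1)).length < s.length := by
      simp [List.length_drop]; omega
    rw [dif_neg hi, hslice_to]
    conv_lhs => rw [hslice_from]
    have hcs : colSplit [] s = s.take i :: colSplit [] (s.drop (i + 1)) := by
      conv_lhs => rw [hdec]
      simpa using colSplit_append [] (s.take i) (s.drop (i + 1)) hno
    rw [hcs]
    cases hv : PySem.Int.ofChars? (s.take i) with
    | none => simp [List.mapM_cons, hv]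
    | some v =>
      show gapScan (s.drop (i + 1)) (total * 60 + v) (n + 1) = _
      rw [ih (s.drop (i + 1)).length hlt (s.drop (i + 1)) (total * 60 + v) (n + 1) rfl]
      cases hm : (colSplit [] (s.drop (i + 1))).mapM PySem.Int.ofChars? with
      | none => simp [List.mapM_cons, hv, hm]
      | some qs =>
        have hlen : n + 1 + qs.length = n + (qs.length + 1) := by omega
        simp [List.mapM_cons, hv, hm, List.foldl, hlen]

-- A's parts (as Strings) convert exactly like the char-level pieces.
lemma mapM_ofStr_ofList (xss : List (List Char)) :
    (xss.map String.ofList).mapM PySem.Int.ofStr? = xss.mapM PySem.Int.ofChars? := by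
  induction xss with
  | nil => rfl
  | cons x t ih =>
    simp only [List.map_cons, List.mapM_cons, ih, PySem.Int.ofStr?, String.toList_ofList]

-- A's two closed-form branches equal the gated Horner fold from 0.
lemma branches_eq_fold (ps : List Int) :
    (if ps.length = 2 then ps.getD 0 0 * 60 + ps.getD 1 0
     else if ps.length = 3 then ps.getD 0 0 * 3600 + ps.getD 1 0 * 60 + ps.getD 2 0
     else 0)
    = (if 0 + ps.length = 2 ∨ 0 + ps.length = 3 then
         ps.foldl (fun t p => t * 60 + p) 0 else 0) := by
  match ps with
  | [] => simp
  | [a] => simp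
  | [a, b] => simp [List.foldl]
  | [a, b, c] =>
    simp [List.foldl]
    ring
  | a :: b :: c :: d :: rest => simp [List.length]

-- ===== VERDICT (by name: the statement is the Claim_ definition above) =====
theorem gap_to_seconds_spec : Claim_equal_gap_to_seconds := by
  intro gap _
  unfold Spec_gap_to_seconds gap_to_seconds gap_to_seconds_alt
  cases h : (gap == "" || PySem.Str.isIn "same" (PySem.Str.lower gap)) with
  | true => simp
  | false =>
    simp only [Bool.false_eq_true, if_false]
    set g := PySem.Str.strip (PySem.Str.replace gap "+" "") with hg
    have hsplit : (PySem.Str.split? g ":").getD [] =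
        (PySem.Chars.splitOn g.toList [':']).map String.ofList := by
      simp [PySem.Str.split?, PySem.Chars.split?]
    rw [hsplit, mapM_ofStr_ofList, splitOn_eq_colSplit, gapScan_eq]
    cases hm : (colSplit [] g.toList).mapM PySem.Int.ofChars? with
    | none => rfl
    | some ps => exact branches_eq_fold ps
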